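-- pv_equiv track=rewrite | github.com/pradhankukiran/graphite | backend/apps/documents/chunkers.py | _merge_splits
-- ===== SOURCE A (Python) =====
-- def _merge_splits(
--     splits: list[str],
--     chunk_size: int,
--     chunk_overlap: int,
-- ) -> list[str]:
--     """
--     Merge small splits into chunks up to chunk_size, with overlap between
--     consecutive chunks.
--     """
--     if not splits:
--         return []
--
--     merged: list[str] = []
--     current_parts: list[str] = []
--     current_length = 0
--
--     for split in splits:
--         split_len = len(split)
--
--         # If adding this split would exceed chunk_size, finalize the current chunk
--         if current_parts and current_length + split_len + 1 > chunk_size: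
--             chunk_str = " ".join(current_parts)
--             merged.append(chunk_str)
--
--             # Keep trailing parts for overlap
--             overlap_parts: list[str] = []
--             overlap_len = 0
--             for part in reversed(current_parts):
--                 if overlap_len + len(part) + 1 > chunk_overlap:
--                     break
--                 overlap_parts.insert(0, part)
--                 overlap_len += len(part) + 1
--
--             current_parts = overlap_parts
--             current_length = sum(len(p) for p in current_parts) + max(
--                 len(current_parts) - 1, 0
--             )
--
--         current_parts.append(split)
--         current_length += split_len + (1 if len(current_parts) > 1 else 0)
--
--     # Flush the last chunk
--     if current_parts:
--         merged.append(" ".join(current_parts))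
--
--     return merged
-- ===== SOURCE B (Python) =====
-- def _merge_splits(
--     splits: list[str],
--     chunk_size: int,
--     chunk_overlap: int,
-- ) -> list[str]:
--     """Two-pointer sliding window over the split list: the current chunk is
--     always the contiguous window splits[start:j]; overlap is expired by
--     advancing `start` with a running length total instead of rescanning and
--     re-building part lists."""
--     merged: list[str] = []
--     start = 0
--     wsum = 0  # sum of len(p) + 1 over splits[start:j]
--     for j, sp in enumerate(splits):
--         if j > start and wsum + len(sp) > chunk_size:
--             merged.append(" ".join(splits[start:j]))
--             while start < j and wsum > chunk_overlap:
--                 wsum -= len(splits[start]) + 1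
--                 start += 1
--         wsum += len(sp) + 1
--     if splits:
--         merged.append(" ".join(splits[start:]))
--     return merged
-- ===== Notes on version B (the rewrite author's own statement) =====
-- stated objective: alternative
-- what changed: B keeps the current chunk as a two-pointer window (start index plus a running length total) over the split list instead of A's rebuilt part-list with a backward overlap rescan and front-insertions, so overlap expiry advances a pointer incrementally.
import Mathlib
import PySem

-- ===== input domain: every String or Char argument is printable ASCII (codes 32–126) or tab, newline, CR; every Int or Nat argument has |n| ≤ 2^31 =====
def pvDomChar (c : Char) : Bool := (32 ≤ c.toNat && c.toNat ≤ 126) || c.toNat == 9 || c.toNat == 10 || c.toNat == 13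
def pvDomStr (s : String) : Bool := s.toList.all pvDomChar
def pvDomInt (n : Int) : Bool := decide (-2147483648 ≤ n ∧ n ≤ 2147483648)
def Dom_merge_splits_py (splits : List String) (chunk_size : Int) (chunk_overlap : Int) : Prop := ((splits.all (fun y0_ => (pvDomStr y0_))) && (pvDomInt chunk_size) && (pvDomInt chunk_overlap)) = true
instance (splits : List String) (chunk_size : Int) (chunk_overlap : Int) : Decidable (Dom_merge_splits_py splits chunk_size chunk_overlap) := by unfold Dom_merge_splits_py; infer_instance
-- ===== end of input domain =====

-- B replaces A's rebuilt part-lists and backward overlap rescan by a two-pointer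
-- sliding window over the split list with a running length total (alternative).

-- ===== PORT A =====
-- A's inner 'for part in reversed(current_parts): … break' loop
def pvOvScan (rev : List String) (ovp : List String) (olen : Int) (co : Int) :
    List String × Int :=
  match rev with
  | [] => (ovp, olen)
  | p :: rest =>
    if olen + PySem.Str.len p + 1 > co then (ovp, olen)
    else pvOvScan rest (p :: ovp) (olen + PySem.Str.len p + 1) co

-- one iteration of A's 'for split in splits' loop; state (merged, current_parts, current_length)
def pvStepA (cs co : Int) (st : List String × List String × Int) (split : String) :
    List String × List String × Int :=
  let sl := PySem.Str.len split
  let st2 :=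
    if st.2.1 ≠ [] ∧ st.2.2 + sl + 1 > cs then
      let merged2 := st.1 ++ [PySem.Str.join " " st.2.1]
      let ov := pvOvScan st.2.1.reverse [] 0 co
      (merged2, ov.1, (ov.1.map PySem.Str.len).sum + max ((ov.1.length : Int) - 1) 0)
    else st
  let cur2 := st2.2.1 ++ [split]
  (st2.1, cur2, st2.2.2 + sl + (if 1 < cur2.length then 1 else 0))

def merge_splits_py (splits : List String) (chunk_size : Int) (chunk_overlap : Int) :
    List String :=
  if splits = [] then []
  else
    let r := splits.foldl (pvStepA chunk_size chunk_overlap) ([], [], 0)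
    if r.2.1 ≠ [] then r.1 ++ [PySem.Str.join " " r.2.1] else r.1

-- ===== PORT B =====
-- B's 'while start < j and wsum > chunk_overlap' loop
def pvShrink (splits : List String) (j : Int) (start : Int) (wsum : Int) (co : Int) :
    Int × Int :=
  if h : start < j then
    if wsum > co then
      pvShrink splits j (start + 1)
        (wsum - (PySem.Str.len (PySem.List.pyGetD splits start "") + 1)) co
    else (start, wsum)
  else (start, wsum)
termination_by (j - start).toNat
decreasing_by omega

-- one iteration of B's 'for j, sp in enumerate(splits)' loop; state (merged, start, wsum)
def pvStepB (splits : List String) (cs co : Int) (st : List String × Int × Int)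
    (e : Int × String) : List String × Int × Int :=
  if e.1 > st.2.1 ∧ st.2.2 + PySem.Str.len e.2 > cs then
    let merged2 := st.1 ++ [PySem.Str.join " " (PySem.List.slice splits (some st.2.1) (some e.1))]
    let sw := pvShrink splits e.1 st.2.1 st.2.2 co
    (merged2, sw.1, sw.2 + PySem.Str.len e.2 + 1)
  else (st.1, st.2.1, st.2.2 + PySem.Str.len e.2 + 1)

def merge_splits_py_alt (splits : List String) (chunk_size : Int) (chunk_overlap : Int) :
    List String :=
  let r := (PySem.List.enumerate splits).foldl (pvStepB splits chunk_size chunk_overlap) ([], 0, 0)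
  if splits ≠ [] then r.1 ++ [PySem.Str.join " " (PySem.List.slice splits (some r.2.1) none)]
  else r.1

-- ===== PRECONDITION & SPEC =====
def Spec_merge_splits_py (splits : List String) (chunk_size : Int) (chunk_overlap : Int) (out : List String) : Prop := out = merge_splits_py_alt splits chunk_size chunk_overlap
instance (splits : List String) (chunk_size : Int) (chunk_overlap : Int) (out : List String) : Decidable (Spec_merge_splits_py splits chunk_size chunk_overlap out) := by unfold Spec_merge_splits_py; infer_instance

-- ===== CLAIM (what is proved, stated in full; the proofs are below) =====
def Claim_equal_merge_splits_py : Prop := ∀ (splits : List String) (chunk_size : Int) (chunk_overlap : Int), Dom_merge_splits_py splits chunk_size chunk_overlap → Spec_merge_splits_py splits chunk_size chunk_overlap (merge_splits_py splits chunk_size chunk_overlap)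

-- ===== LEMMAS AND PROOFS =====

-- weight xs = sum of len(p)+1 over xs (B's wsum); jlen xs = len(" ".join(xs)) (A's current_length)
def pvWeight (xs : List String) : Int := (xs.map (fun s => PySem.Str.len s + 1)).sum
def pvJlen (xs : List String) : Int := if xs = [] then 0 else pvWeight xs - 1

-- number of parts A's overlap scan drops from the front of the window
def pvDropCount (xs : List String) (b : Int) : Nat :=
  match xs with
  | [] => 0
  | _ :: rest => if b < pvWeight xs then pvDropCount rest b + 1 else 0

-- forward view of A's backward overlap scan
def pvKeep (rev : List String) (b : Int) : List String :=
  match rev with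
  | [] => []
  | p :: rest =>
    if b < PySem.Str.len p + 1 then []
    else p :: pvKeep rest (b - (PySem.Str.len p + 1))

theorem pvWeight_cons (p : String) (xs : List String) :
    pvWeight (p :: xs) = PySem.Str.len p + 1 + pvWeight xs := by
  simp [pvWeight]

theorem pvWeight_append (xs ys : List String) :
    pvWeight (xs ++ ys) = pvWeight xs + pvWeight ys := by
  simp [pvWeight]

theorem pvWeight_nonneg (xs : List String) : 0 ≤ pvWeight xs := by
  induction xs with
  | nil => simp [pvWeight]
  | cons p rest ih =>
    have := PySem.Str.len_eq p
    rw [pvWeight_cons]; omega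

theorem pvDropCount_le (xs : List String) (b : Int) : pvDropCount xs b ≤ xs.length := by
  induction xs generalizing b with
  | nil => simp [pvDropCount]
  | cons p rest ih =>
    simp only [pvDropCount, List.length_cons]
    split
    · exact Nat.succ_le_succ (ih b)
    · omega

theorem pvDropCount_append (ys : List String) (p : String) (b : Int) :
    pvDropCount (ys ++ [p]) b =
      if PySem.Str.len p + 1 ≤ b then pvDropCount ys (b - (PySem.Str.len p + 1))
      else ys.length + 1 := by
  induction ys generalizing b with
  | nil =>
    simp only [List.nil_append, pvDropCount, pvWeight, List.map, List.sum_cons, List.sum_nil,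
      List.length_nil]
    split_ifs <;> omega
  | cons q ys ih =>
    have hq := PySem.Str.len_eq q
    have hp := PySem.Str.len_eq p
    have hw := pvWeight_nonneg ys
    have hL : pvWeight (q :: (ys ++ [p])) = PySem.Str.len q + 1 + pvWeight ys + (PySem.Str.len p + 1) := by
      simp [pvWeight]; ring
    have hwq : pvWeight (q :: ys) = PySem.Str.len q + 1 + pvWeight ys := pvWeight_cons _ _
    simp only [List.cons_append, pvDropCount, ih, hL, hwq, List.length_cons]
    split_ifs <;> omega

theorem pvKeep_eq_drop (cur : List String) (b : Int) :
    pvKeep cur.reverse b = (cur.drop (pvDropCount cur b)).reverse := by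
  induction cur using List.reverseRecOn generalizing b with
  | nil => simp [pvKeep]
  | append_singleton ys p ih =>
    rw [List.reverse_append, List.reverse_singleton]
    simp only [List.singleton_append, pvKeep]
    rw [pvDropCount_append]
    by_cases hc : PySem.Str.len p + 1 ≤ b
    · rw [if_neg (by omega), if_pos hc, ih]
      have hm : pvDropCount ys (b - (PySem.Str.len p + 1)) ≤ ys.length := pvDropCount_le _ _
      rw [List.drop_append_of_le_length hm]
      simp
    · rw [if_pos (by omega), if_neg hc]
      have : ys.length + 1 = (ys ++ [p]).length := by simp
      rw [this, List.drop_length]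
      simp

theorem pvOvScan_keep (rev : List String) (acc : List String) (olen co : Int) :
    pvOvScan rev acc olen co =
      ((pvKeep rev (co - olen)).reverse ++ acc, olen + pvWeight (pvKeep rev (co - olen))) := by
  induction rev generalizing acc olen with
  | nil => simp [pvOvScan, pvKeep, pvWeight]
  | cons p rest ih =>
    simp only [pvOvScan, pvKeep]
    by_cases hc : olen + PySem.Str.len p + 1 > co
    · rw [if_pos hc, if_pos (by omega)]
      simp [pvWeight]
    · rw [if_neg hc, if_neg (by omega), ih]
      have : co - olen - (PySem.Str.len p + 1) = co - (olen + PySem.Str.len p + 1) := by ring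
      rw [this]
      simp only [List.reverse_cons, pvWeight_cons]
      congr 1
      · rw [List.append_cons]
      · ring

theorem pvOvScan_spec (cur : List String) (co : Int) :
    pvOvScan cur.reverse [] 0 co =
      ((cur.drop (pvDropCount cur co)), pvWeight (cur.drop (pvDropCount cur co))) := by
  rw [pvOvScan_keep]
  have h0 : co - 0 = co := by ring
  rw [h0, pvKeep_eq_drop, List.reverse_reverse]
  have hw : ∀ xs : List String, pvWeight xs.reverse = pvWeight xs := by
    intro xs; simp [pvWeight]
  rw [List.append_nil, hw]
  simp

theorem pvRecompute (xs : List String) :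
    (xs.map PySem.Str.len).sum + max ((xs.length : Int) - 1) 0 = pvJlen xs := by
  have hsum : pvWeight xs = (xs.map PySem.Str.len).sum + xs.length := by
    induction xs with
    | nil => simp [pvWeight]
    | cons p rest ih => simp only [pvWeight_cons, List.map_cons, List.sum_cons,
        List.length_cons] at *; push_cast; omega
  cases xs with
  | nil => simp [pvJlen]
  | cons p rest =>
    simp only [pvJlen, List.length_cons, if_neg (List.cons_ne_nil p rest)]
    rw [hsum] at *
    simp only [List.length_cons]
    push_cast
    omega

theorem pvGetD_of_drop (splits : List String) (start : Nat) (p : String) (t : List String)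
    (h : splits.drop start = p :: t) : splits.getD start "" = p := by
  have h0 : splits[start]? = some p := by
    have := (List.getElem?_drop (xs := splits) (i := start) (j := 0)).symm
    rw [h] at this; simpa using this
  simp [List.getD_eq_getElem?_getD, h0]

theorem pvShrink_spec (splits : List String) (co : Int) :
    ∀ (cur : List String) (start : Nat), cur <+: splits.drop start →
    pvShrink splits ((start + cur.length : Nat) : Int) (start : Int) (pvWeight cur) co =
      (((start + pvDropCount cur co : Nat) : Int),
        pvWeight (cur.drop (pvDropCount cur co))) := by
  intro cur
  induction cur with
  | nil =>
    intro start _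
    rw [pvShrink]
    simp [pvDropCount]
  | cons p rest ih =>
    intro start hpre
    obtain ⟨t, ht⟩ := hpre
    have hdrop : splits.drop start = p :: (rest ++ t) := by rw [← ht]; rfl
    have hget : PySem.List.pyGetD splits (start : Int) "" = p := by
      rw [PySem.List.pyGetD_natCast]
      exact pvGetD_of_drop splits start p (rest ++ t) hdrop
    have hrest : rest <+: splits.drop (start + 1) := by
      refine ⟨t, ?_⟩
      have h1 : splits.drop (start + 1) = (splits.drop start).drop 1 := by
        rw [List.drop_drop]
      rw [h1, hdrop]
      rfl
    rw [pvShrink]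
    rw [dif_pos (by simp only [List.length_cons]; push_cast; omega :
      (start : Int) < ((start + (p :: rest).length : Nat) : Int))]
    by_cases hb : pvWeight (p :: rest) > co
    · rw [if_pos hb, hget]
      have hw : pvWeight (p :: rest) - (PySem.Str.len p + 1) = pvWeight rest := by
        rw [pvWeight_cons]; ring
      rw [hw]
      have hc1 : ((start : Int) + 1) = ((start + 1 : Nat) : Int) := by push_cast; ring
      have hc2 : ((start + (p :: rest).length : Nat) : Int) = (((start + 1) + rest.length : Nat) : Int) := by
        simp only [List.length_cons]; congr 1; omega
      rw [hc1, hc2, ih (start + 1) hrest]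
      have hdc : pvDropCount (p :: rest) co = pvDropCount rest co + 1 := by
        simp only [pvDropCount]; rw [if_pos (by omega)]
      rw [hdc]
      have he : start + 1 + pvDropCount rest co = start + (pvDropCount rest co + 1) := by omega
      rw [List.drop_succ_cons, ← he]
    · rw [if_neg hb]
      have hdc : pvDropCount (p :: rest) co = 0 := by
        simp only [pvDropCount]; rw [if_neg (by omega)]
      rw [hdc]
      simp

theorem pvJlen_append_singleton (xs : List String) (p : String) :
    pvJlen (xs ++ [p]) =
      pvJlen xs + PySem.Str.len p + (if 1 < (xs ++ [p]).length then 1 else 0) := by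
  cases xs with
  | nil => simp [pvJlen, pvWeight]
  | cons q xs' =>
    have h1 : (q :: xs') ++ [p] ≠ [] := by simp
    simp only [pvJlen, if_neg h1, if_neg (List.cons_ne_nil q xs')]
    rw [pvWeight_append]
    have h2 : pvWeight [p] = PySem.Str.len p + 1 := by simp [pvWeight]
    rw [h2, if_pos (by simp)]
    ring

theorem pvWeight_append_singleton (xs : List String) (p : String) :
    pvWeight (xs ++ [p]) = pvWeight xs + PySem.Str.len p + 1 := by
  rw [pvWeight_append]
  have h2 : pvWeight [p] = PySem.Str.len p + 1 := by simp [pvWeight]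
  rw [h2]; ring

theorem pv_loop (cs co : Int) (splits : List String) :
    ∀ (rest pre merged : List String) (start : Nat),
      splits = pre ++ rest → start ≤ pre.length →
      ∃ (start' : Nat) (merged' : List String),
        start' ≤ splits.length ∧
        (rest = [] → start' = start) ∧
        (rest ≠ [] → start' < splits.length) ∧
        List.foldl (pvStepA cs co) (merged, pre.drop start, pvJlen (pre.drop start)) rest
          = (merged', splits.drop start', pvJlen (splits.drop start')) ∧
        List.foldl (pvStepB splits cs co) (merged, (start : Int), pvWeight (pre.drop start))
            (PySem.List.enumerate rest (pre.length : Int))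
          = (merged', (start' : Int), pvWeight (splits.drop start')) := by
  intro rest
  induction rest with
  | nil =>
    intro pre merged start hsp hle
    refine ⟨start, merged, ?_, fun _ => rfl, fun h => absurd rfl h, ?_, ?_⟩
    · rw [hsp, List.append_nil]; exact le_trans hle (le_refl _)
    · rw [hsp, List.append_nil]; rfl
    · rw [PySem.List.enumerate_nil, List.foldl_nil, hsp, List.append_nil]
  | cons sp rest' ih =>
    intro pre merged start hsp hle
    set cur := pre.drop start with hcur
    have hcurlen : cur.length = pre.length - start := by rw [hcur, List.length_drop]
    have hne_iff : cur ≠ [] ↔ start < pre.length := by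
      rw [hcur, ne_eq, List.drop_eq_nil_iff]
      omega
    have hsplit_drop : splits.drop start = cur ++ (sp :: rest') := by
      rw [hsp, List.drop_append_of_le_length hle]
    rw [List.foldl_cons, PySem.List.enumerate_cons, List.foldl_cons]
    have hpre1 : (pre.length : Int) + 1 = (((pre ++ [sp]).length : Nat) : Int) := by
      simp
    by_cases hGA : cur ≠ [] ∧ pvJlen cur + PySem.Str.len sp + 1 > cs
    · -- finalize the current chunk
      have hstartlt : start < pre.length := hne_iff.mp hGA.1
      have hGB : (pre.length : Int) > (start : Int) ∧ pvWeight cur + PySem.Str.len sp > cs := by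
        refine ⟨by exact_mod_cast hstartlt, ?_⟩
        have : pvJlen cur = pvWeight cur - 1 := by rw [pvJlen, if_neg hGA.1]
        have h2 := hGA.2
        omega
      set k := pvDropCount cur co with hk
      have hkle : k ≤ cur.length := pvDropCount_le _ _
      have hslice : PySem.List.slice splits (some (start : Int)) (some (pre.length : Int)) = cur := by
        rw [PySem.List.slice_natCast, hsplit_drop]
        rw [List.take_append_of_le_length (by omega)]
        exact List.take_of_length_le (by omega)
      have hshrink : pvShrink splits ((pre.length : Nat) : Int) ((start : Nat) : Int)
          (pvWeight cur) co = (((start + k : Nat) : Int), pvWeight (cur.drop k)) := by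
        have hj : ((pre.length : Nat) : Int) = ((start + cur.length : Nat) : Int) := by
          congr 1; omega
        rw [hj]
        exact pvShrink_spec splits co cur start ⟨sp :: rest', hsplit_drop.symm⟩
      have hA_step : pvStepA cs co (merged, cur, pvJlen cur) sp =
          (merged ++ [PySem.Str.join " " cur], cur.drop k ++ [sp], pvJlen (cur.drop k ++ [sp])) := by
        simp only [pvStepA]
        rw [if_pos hGA, pvOvScan_spec]
        simp only [pvRecompute]
        rw [← pvJlen_append_singleton]
      have hB_step : pvStepB splits cs co (merged, (start : Int), pvWeight cur)
            ((pre.length : Int), sp) =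
          (merged ++ [PySem.Str.join " " cur], ((start + k : Nat) : Int),
            pvWeight (cur.drop k ++ [sp])) := by
        simp only [pvStepB]
        rw [if_pos hGB, hslice, hshrink, pvWeight_append_singleton]
      rw [hA_step, hB_step]
      have hdrop' : (pre ++ [sp]).drop (start + k) = cur.drop k ++ [sp] := by
        rw [List.drop_append_of_le_length (by omega)]
        congr 1
        rw [hcur, List.drop_drop]
      obtain ⟨start', merged', h1, h2, h3, h4, h5⟩ :=
        ih (pre ++ [sp]) (merged ++ [PySem.Str.join " " cur]) (start + k)
          (by rw [hsp]; simp) (by simp; omega)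
      refine ⟨start', merged', h1, ?_, ?_, ?_, ?_⟩
      · intro h; exact absurd h (by simp)
      · intro _
        by_cases hr : rest' = []
        · have := h2 hr
          have hsl : splits = pre ++ [sp] := by rw [hsp, hr]
          rw [hsl]
          simp only [List.length_append, List.length_cons, List.length_nil]
          omega
        · exact h3 hr
      · rw [← hdrop']; exact h4
      · rw [hpre1, ← hdrop'] at *
        exact h5
    · -- no finalize: just extend the window
      have hGB : ¬((pre.length : Int) > (start : Int) ∧ pvWeight cur + PySem.Str.len sp > cs) := by
        intro hc
        apply hGA
        have hlt : start < pre.length := by exact_mod_cast hc.1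
        have hnn : cur ≠ [] := hne_iff.mpr hlt
        refine ⟨hnn, ?_⟩
        have : pvJlen cur = pvWeight cur - 1 := by rw [pvJlen, if_neg hnn]
        have h2 := hc.2
        omega
      have hA_step : pvStepA cs co (merged, cur, pvJlen cur) sp =
          (merged, cur ++ [sp], pvJlen (cur ++ [sp])) := by
        simp only [pvStepA]
        rw [if_neg hGA, ← pvJlen_append_singleton]
      have hB_step : pvStepB splits cs co (merged, (start : Int), pvWeight cur)
            ((pre.length : Int), sp) =
          (merged, (start : Int), pvWeight (cur ++ [sp])) := by
        simp only [pvStepB]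
        rw [if_neg hGB, pvWeight_append_singleton]
      rw [hA_step, hB_step]
      have hdrop' : (pre ++ [sp]).drop start = cur ++ [sp] := by
        rw [List.drop_append_of_le_length hle]
      obtain ⟨start', merged', h1, h2, h3, h4, h5⟩ :=
        ih (pre ++ [sp]) merged start (by rw [hsp]; simp) (by simp; omega)
      refine ⟨start', merged', h1, ?_, ?_, ?_, ?_⟩
      · intro h; exact absurd h (by simp)
      · intro _
        by_cases hr : rest' = []
        · have := h2 hr
          have hsl : splits = pre ++ [sp] := by rw [hsp, hr]
          rw [hsl]
          simp only [List.length_append, List.length_cons, List.length_nil]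
          omega
        · exact h3 hr
      · rw [← hdrop']; exact h4
      · rw [hpre1, ← hdrop'] at *
        exact h5

-- ===== VERDICT (by name: the statement is the Claim_ definition above) =====
theorem merge_splits_py_spec : Claim_equal_merge_splits_py := by
  intro splits cs co _
  unfold Spec_merge_splits_py merge_splits_py merge_splits_py_alt
  by_cases hs : splits = []
  · subst hs
    simp [PySem.List.enumerate_nil]
  · rw [if_neg hs]
    obtain ⟨start', merged', h1, h2, h3, hA, hB⟩ :=
      pv_loop cs co splits splits [] [] 0 (by simp) (by simp)
    have hinit : (0 : Int) = ((0 : Nat) : Int) := by simp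
    have hz1 : pvJlen (([] : List String).drop 0) = 0 := by simp [pvJlen]
    have hz2 : pvWeight (([] : List String).drop 0) = 0 := by simp [pvWeight]
    have hz3 : ((List.length ([] : List String) : Nat) : Int) = 0 := by simp
    rw [hz3] at hB
    have hA' : splits.foldl (pvStepA cs co) ([], [], 0)
        = (merged', splits.drop start', pvJlen (splits.drop start')) := by
      simpa [pvJlen] using hA
    have hB' : (PySem.List.enumerate splits 0).foldl (pvStepB splits cs co) ([], 0, 0)
        = (merged', (start' : Int), pvWeight (splits.drop start')) := by
      simpa [pvWeight] using hB
    have hlt := h3 hs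
    have hnn : splits.drop start' ≠ [] := by
      rw [ne_eq, List.drop_eq_nil_iff]; omega
    simp only [hA', hB']
    rw [PySem.List.slice_from_natCast]
    rw [if_pos hnn, if_pos (show splits ≠ [] from hs)]
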